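-- pv_equiv track=rewrite | github.com/PierreNedellec/Cipher-toolbox | main_code.py | double_char_to_one
-- ===== SOURCE A (Python) =====
-- import string
--
-- def double_char_to_one(text):
--     translator = dict()
--     alphabet = list(string.ascii_uppercase)
--
--     for chars in range(0,len(text),2):
--         charpair = text[chars:(chars+2)]
--         if charpair not in translator.keys():
--             translator[charpair] = alphabet[len(translator)]
--
--     newtext = ''.join(translator.get(text[c:(c+2)], 'error') for c in range(0,len(text),2))
--     # ^adapted version of monoalphabetic_decryption funciton
--     return newtext
-- ===== SOURCE B (Python) =====
-- import string
--
-- def double_char_to_one(text):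
--     pairs = [text[i:i + 2] for i in range(0, len(text), 2)]
--     out = []
--     for p in pairs:
--         rank = len(set(pairs[:pairs.index(p)]))
--         out.append(string.ascii_uppercase[rank])
--     return ''.join(out)
-- ===== Notes on version B (the rewrite author's own statement) =====
-- stated objective: alternative
-- what changed: B keeps no translator table at all: for each pair it computes the letter index directly as len(set(pairs[:pairs.index(p)])) - the number of distinct pairs before the pair's first occurrence, which is its first-seen rank - instead of A's conditional-insert dict built in one pass and read in a second.
import Mathlib
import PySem

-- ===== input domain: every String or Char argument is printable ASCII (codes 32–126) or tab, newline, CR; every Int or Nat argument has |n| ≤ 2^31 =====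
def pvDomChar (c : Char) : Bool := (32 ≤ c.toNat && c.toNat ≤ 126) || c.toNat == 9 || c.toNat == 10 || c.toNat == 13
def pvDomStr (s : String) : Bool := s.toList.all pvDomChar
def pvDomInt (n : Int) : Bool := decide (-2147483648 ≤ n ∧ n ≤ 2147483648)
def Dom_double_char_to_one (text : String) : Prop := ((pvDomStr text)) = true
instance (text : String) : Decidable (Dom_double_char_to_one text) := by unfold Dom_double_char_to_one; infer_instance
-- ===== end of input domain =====

-- B keeps no translator table: each pair's letter index is computed directly as the number of
-- distinct pairs before its first occurrence (its first-seen rank); objective: alternative.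
-- Equal return value on Pre_ (at most 26 distinct pairs; beyond that Python raises IndexError in both).

-- ===== PORT A =====
-- alphabet = list(string.ascii_uppercase): a list of one-character strings
def pvAlphabetA : List (List Char) := "ABCDEFGHIJKLMNOPQRSTUVWXYZ".toList.map (fun c => [c])

def double_char_to_one (text : String) : String :=
  let s := text.toList
  let translator : PySem.Dict (List Char) (List Char) :=
    (PySem.List.pyRange 0 (s.length : Int) 2).foldl
      (fun d chars =>
        let charpair := PySem.List.slice s (some chars) (some (chars + 2))
        if d.contains charpair = false then
          -- alphabet[len(translator)]: index ≥ 26 is IndexError in Python, excluded by Pre_; the [] default is unreachable there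
          d.insert charpair ((PySem.List.pyGet? pvAlphabetA (d.size : Int)).getD [])
        else d)
      PySem.Dict.empty
  String.mk (PySem.Chars.join []
    ((PySem.List.pyRange 0 (s.length : Int) 2).map
      (fun c => translator.getD (PySem.List.slice s (some c) (some (c + 2))) "error".toList)))

-- ===== PORT B =====
def pvUpperB : List Char := "ABCDEFGHIJKLMNOPQRSTUVWXYZ".toList

def double_char_to_one_alt (text : String) : String :=
  let pairs := (PySem.List.pyRange 0 (text.toList.length : Int) 2).map
      (fun i => PySem.List.slice text.toList (some i) (some (i + 2)))
  let out := pairs.foldl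
    (fun acc p =>
      -- pairs.index(p): p is drawn from pairs, so index never raises; the getD 0 default is unreachable
      let rank := (PySem.Set.ofList
          (PySem.List.slice pairs none (some (((PySem.List.index? pairs p).getD 0 : Nat) : Int)))).length
      -- string.ascii_uppercase[rank]: rank ≥ 26 is IndexError in Python, excluded by Pre_; the ' ' default is unreachable there
      acc ++ [(PySem.List.pyGet? pvUpperB (rank : Int)).getD ' '])
    []
  String.mk out

-- ===== PRECONDITION & SPEC =====
-- the character pairs text is cut into, in order
def pvPairs (s : List Char) : List (List Char) :=
  (PySem.List.pyRange 0 (s.length : Int) 2).map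
    (fun i => PySem.List.slice s (some i) (some (i + 2)))

-- Pre_ excludes exactly the inputs with more than 26 distinct character pairs, on which Python A
-- (and Python B) raise IndexError indexing the 26-letter alphabet.
def Pre_double_char_to_one (text : String) : Prop :=
  (PySem.List.dedup (pvPairs text.toList)).length ≤ 26
instance (text : String) : Decidable (Pre_double_char_to_one text) := by
  unfold Pre_double_char_to_one; infer_instance

def pvWitness_double_char_to_one : String := "aabbab x"

def Spec_double_char_to_one (text : String) (out : String) : Prop := out = double_char_to_one_alt text
instance (text : String) (out : String) : Decidable (Spec_double_char_to_one text out) := by unfold Spec_double_char_to_one; infer_instance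

-- ===== CLAIM (what is proved, stated in full; the proofs are below) =====
def Claim_equal_double_char_to_one : Prop := ∀ (text : String), Dom_double_char_to_one text → Pre_double_char_to_one text → Spec_double_char_to_one text (double_char_to_one text)

-- ===== LEMMAS AND PROOFS =====

-- alphabet[i] as A reads it (a one-character string) and as B reads it (a character)
def pvAlphaA (i : Int) : List Char := (PySem.List.pyGet? pvAlphabetA i).getD []
def pvAlphaB (i : Int) : Char := (PySem.List.pyGet? pvUpperB i).getD ' '

-- A's loop body, over an already-sliced pair
def pvStepA (d : PySem.Dict (List Char) (List Char)) (p : List Char) : PySem.Dict (List Char) (List Char) :=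
  if d.contains p = false then d.insert p (pvAlphaA (d.size : Int)) else d

-- first occurrences of ps that are not in seen, paired with successive alphabet values from index n
def pvFreshAssign (seen : List (List Char)) (n : Int) : List (List Char) → List ((List Char) × (List Char))
  | [] => []
  | p :: ps => if p ∈ seen then pvFreshAssign seen n ps
               else (p, pvAlphaA n) :: pvFreshAssign (p :: seen) (n + 1) ps

-- first occurrences of ps that are not in seen
def pvDedupFrom (seen : List (List Char)) : List (List Char) → List (List Char)
  | [] => []
  | p :: ps => if p ∈ seen then pvDedupFrom seen ps else p :: pvDedupFrom (p :: seen) ps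

theorem pvFreshAssign_congr (s₁ s₂ : List (List Char)) (n : Int) (ps : List (List Char))
    (h : ∀ x, x ∈ s₁ ↔ x ∈ s₂) : pvFreshAssign s₁ n ps = pvFreshAssign s₂ n ps := by
  induction ps generalizing s₁ s₂ n with
  | nil => rfl
  | cons p ps ih =>
    simp only [pvFreshAssign]
    by_cases hp : p ∈ s₁
    · rw [if_pos hp, if_pos ((h p).mp hp)]; exact ih _ _ _ h
    · rw [if_neg hp, if_neg (fun hp2 => hp ((h p).mpr hp2))]
      refine congrArg _ (ih _ _ _ ?_)
      intro x; simp [h x]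

theorem pvDedupFrom_congr (s₁ s₂ : List (List Char)) (ps : List (List Char))
    (h : ∀ x, x ∈ s₁ ↔ x ∈ s₂) : pvDedupFrom s₁ ps = pvDedupFrom s₂ ps := by
  induction ps generalizing s₁ s₂ with
  | nil => rfl
  | cons p ps ih =>
    simp only [pvDedupFrom]
    by_cases hp : p ∈ s₁
    · rw [if_pos hp, if_pos ((h p).mp hp)]; exact ih _ _ h
    · rw [if_neg hp, if_neg (fun hp2 => hp ((h p).mpr hp2))]
      refine congrArg _ (ih _ _ ?_)
      intro x; simp [h x]

-- A's translator-building loop appends exactly the fresh first occurrences with successive values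
theorem pvFoldA_items (ps : List (List Char)) (d : PySem.Dict (List Char) (List Char))
    (hn : d.keys.Nodup) :
    (ps.foldl pvStepA d).items = d.items ++ pvFreshAssign d.keys (d.size : Int) ps := by
  induction ps generalizing d with
  | nil => simp [pvFreshAssign]
  | cons p ps ih =>
    simp only [List.foldl_cons]
    by_cases hc : d.contains p = true
    · have hmem : p ∈ d.keys := (PySem.Dict.contains_iff_mem_keys d p).mp hc
      have hstep : pvStepA d p = d := by simp [pvStepA, hc]
      rw [hstep, ih d hn]
      simp [pvFreshAssign, hmem]
    · have hc' : d.contains p = false := by simpa using hc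
      have hmem : p ∉ d.keys := fun h => hc ((PySem.Dict.contains_iff_mem_keys d p).mpr h)
      have hstep : pvStepA d p = d.insert p (pvAlphaA (d.size : Int)) := by simp [pvStepA, hc']
      rw [hstep, ih _ (PySem.Dict.nodup_keys_insert d p _ hn)]
      rw [PySem.Dict.items_insert_of_not_contains d _ hc',
          PySem.Dict.keys_insert_of_not_contains d _ hc',
          PySem.Dict.size_insert]
      rw [if_neg (by simp [hc'])]
      rw [pvFreshAssign_congr (d.keys ++ [p]) (p :: d.keys) _ ps (by intro x; simp; tauto)]
      simp [pvFreshAssign, hmem]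

-- pvFreshAssign is the enumeration of pvDedupFrom
theorem pvFreshAssign_enum (ps seen : List (List Char)) (n : Int) :
    pvFreshAssign seen n ps
      = (PySem.List.enumerate (pvDedupFrom seen ps) n).map (fun q => (q.2, pvAlphaA q.1)) := by
  induction ps generalizing seen n with
  | nil => rfl
  | cons p ps ih =>
    simp only [pvFreshAssign, pvDedupFrom]
    by_cases hp : p ∈ seen
    · rw [if_pos hp, if_pos hp, ih]
    · rw [if_neg hp, if_neg hp, PySem.List.enumerate_cons]
      simp [ih]

theorem pvDedupFrom_eq_dedup (ps : List (List Char)) :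
    pvDedupFrom [] ps = PySem.List.dedup ps := by
  have key : ∀ (ps acc : List (List Char)), ps.foldl PySem.Set.add acc = acc ++ pvDedupFrom acc ps := by
    intro ps
    induction ps with
    | nil => intro acc; simp [pvDedupFrom]
    | cons p ps ih =>
      intro acc
      simp only [List.foldl_cons]
      by_cases hp : p ∈ acc
      · have : PySem.Set.add acc p = acc := by
          simp [PySem.Set.add, hp]
        rw [this, ih acc]
        simp [pvDedupFrom, hp]
      · have : PySem.Set.add acc p = acc ++ [p] := by
          simp [PySem.Set.add, hp]
        rw [this, ih (acc ++ [p]),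
            pvDedupFrom_congr (acc ++ [p]) (p :: acc) ps (by intro x; simp; tauto)]
        simp [pvDedupFrom, hp]
  have := key ps []
  simpa [PySem.List.dedup, PySem.Set.ofList, PySem.Set.empty] using this.symm

theorem pvAlpha_link (k : Nat) (hk : k < 26) : pvAlphaA (k : Int) = [pvAlphaB (k : Int)] := by
  interval_cases k <;> rfl

-- the items and keys of A's finished translator
theorem pvItemsA (ps : List (List Char)) :
    (ps.foldl pvStepA PySem.Dict.empty).items
      = (PySem.List.enumerate (PySem.List.dedup ps)).map (fun q => (q.2, pvAlphaA q.1)) := by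
  rw [pvFoldA_items ps PySem.Dict.empty (by simp [PySem.Dict.empty, PySem.Dict.keys])]
  have h1 : (PySem.Dict.empty : PySem.Dict (List Char) (List Char)).items = [] := rfl
  have h2 : (PySem.Dict.empty : PySem.Dict (List Char) (List Char)).keys = [] := rfl
  have h3 : (PySem.Dict.empty : PySem.Dict (List Char) (List Char)).size = 0 := rfl
  rw [h1, h2, h3, pvFreshAssign_enum, pvDedupFrom_eq_dedup]
  simp

theorem pvKeysA (ps : List (List Char)) :
    (ps.foldl pvStepA PySem.Dict.empty).keys = PySem.List.dedup ps := by
  show (ps.foldl pvStepA PySem.Dict.empty).items.map (fun x => x.1) = _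
  rw [pvItemsA, List.map_map]
  exact PySem.List.map_snd_enumerate _ _

-- B's rank of a pair, exactly as the port computes it
def pvRank (ps : List (List Char)) (p : List Char) : Nat :=
  (PySem.Set.ofList
    (PySem.List.slice ps none (some (((PySem.List.index? ps p).getD 0 : Nat) : Int)))).length

-- the first-seen rank: the index of p in the ordered dedup is the number of distinct
-- elements strictly before p's first occurrence
theorem pvIdxRank (ps seen : List (List Char)) (p : List Char) (j : Nat)
    (hp : p ∉ seen) (hj : PySem.List.index? ps p = some j) :
    PySem.List.index? (pvDedupFrom seen ps) p
      = some ((pvDedupFrom seen (ps.take j)).length) := by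
  induction ps generalizing seen j with
  | nil => rw [PySem.List.index?_eq_idxOf?] at hj; simp at hj
  | cons q ps ih =>
    by_cases hq : q = p
    · subst hq
      rw [PySem.List.index?_cons_self] at hj
      obtain rfl : j = 0 := by injection hj; omega
      simp only [List.take_zero, pvDedupFrom]
      rw [if_neg hp, PySem.List.index?_cons_self]
      simp
    · rw [PySem.List.index?_cons_of_ne _ hq] at hj
      obtain ⟨j', hj', rfl⟩ : ∃ j', PySem.List.index? ps p = some j' ∧ j = j' + 1 := by
        cases h : PySem.List.index? ps p with
        | none => rw [h] at hj; simp at hj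
        | some k => rw [h] at hj; simp at hj; exact ⟨k, rfl, hj.symm⟩
      simp only [List.take_succ_cons, pvDedupFrom]
      by_cases hqs : q ∈ seen
      · rw [if_pos hqs, if_pos hqs]
        exact ih seen j' hp hj'
      · rw [if_neg hqs, if_neg hqs]
        rw [PySem.List.index?_cons_of_ne _ hq]
        rw [ih (q :: seen) j' (by simp [hp, Ne.symm hq]) hj']
        simp

-- the two per-pair values coincide: A's table lookup is B's alphabet-at-rank (as a 1-char string)
theorem pvLookup (ps : List (List Char)) (hle : (PySem.List.dedup ps).length ≤ 26)
    (p : List Char) (hp : p ∈ ps) :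
    (ps.foldl pvStepA PySem.Dict.empty).getD p "error".toList = [pvAlphaB ((pvRank ps p : Nat) : Int)] := by
  obtain ⟨j, hj⟩ := Option.isSome_iff_exists.mp ((PySem.List.index?_isSome_iff ps p).mpr hp)
  have hrank : pvRank ps p = (PySem.List.dedup (ps.take j)).length := by
    unfold pvRank
    rw [hj]
    rw [show ((some j).getD 0) = j from rfl]
    rw [PySem.List.slice_to_natCast]
    rw [← PySem.List.dedup_eq_ofList]
  have hidx : PySem.List.index? (PySem.List.dedup ps) p = some (pvRank ps p) := by
    rw [hrank, ← pvDedupFrom_eq_dedup, ← pvDedupFrom_eq_dedup]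
    exact pvIdxRank ps [] p j (by simp) hj
  obtain ⟨hk, hpk, -⟩ := PySem.List.getElem_of_index?_eq_some hidx
  have henum : ((0 : Int) + ((pvRank ps p : Nat) : Int), p)
      ∈ PySem.List.enumerate (PySem.List.dedup ps) 0 :=
    (PySem.List.mem_enumerate_iff _ _ _).mpr ⟨pvRank ps p, hk, by rw [hpk]⟩
  have hmemA : (p, pvAlphaA ((0 : Int) + ((pvRank ps p : Nat) : Int)))
      ∈ (ps.foldl pvStepA PySem.Dict.empty).items := by
    rw [pvItemsA]
    exact List.mem_map_of_mem henum
  have hnodA : (ps.foldl pvStepA PySem.Dict.empty).keys.Nodup := by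
    rw [pvKeysA]; exact PySem.List.nodup_dedup ps
  rw [PySem.Dict.getD_of_mem_items _ hmemA hnodA]
  have hzk : (0 : Int) + ((pvRank ps p : Nat) : Int) = ((pvRank ps p : Nat) : Int) := by ring
  rw [hzk]
  exact pvAlpha_link (pvRank ps p) (lt_of_lt_of_le hk hle)

-- a foldl appending one element per item is a map
theorem pvFoldl_append_map (f : List Char → Char) :
    ∀ (l : List (List Char)) (acc : List Char),
      l.foldl (fun a p => a ++ [f p]) acc = acc ++ l.map f := by
  intro l
  induction l with
  | nil => intro acc; simp
  | cons p l ih => intro acc; simp [ih]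

-- A rephrased over the pair list (the same loop, List.foldl_map / List.map_map away)
theorem pvA_shape (text : String) :
    double_char_to_one text
      = String.mk (PySem.Chars.join []
          ((pvPairs text.toList).map (fun p =>
            ((pvPairs text.toList).foldl pvStepA PySem.Dict.empty).getD p "error".toList))) := by
  unfold double_char_to_one
  rw [pvPairs, List.foldl_map, List.map_map]
  rfl

theorem pvB_shape (text : String) :
    double_char_to_one_alt text
      = String.mk ((pvPairs text.toList).map
          (fun p => pvAlphaB ((pvRank (pvPairs text.toList) p : Nat) : Int))) := by
  show String.mk ((pvPairs text.toList).foldl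
      (fun acc p => acc ++ [pvAlphaB ((pvRank (pvPairs text.toList) p : Nat) : Int)]) []) = _
  rw [pvFoldl_append_map (fun p => pvAlphaB ((pvRank (pvPairs text.toList) p : Nat) : Int))]
  rfl

-- ===== VERDICT (by name: the statement is the Claim_ definition above) =====
theorem double_char_to_one_spec : Claim_equal_double_char_to_one := by
  intro text _ hpre
  unfold Pre_double_char_to_one at hpre
  unfold Spec_double_char_to_one
  rw [pvA_shape, pvB_shape]
  refine congrArg String.mk ?_
  rw [List.map_congr_left (fun p hp => pvLookup (pvPairs text.toList) hpre p hp)]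
  rw [show (fun p => [pvAlphaB ((pvRank (pvPairs text.toList) p : Nat) : Int)])
        = (fun c => [c]) ∘ (fun p => pvAlphaB ((pvRank (pvPairs text.toList) p : Nat) : Int)) from rfl]
  rw [← List.map_map]
  exact PySem.Chars.join_nil_singletons _
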